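-- pv_equiv track=rewrite | github.com/rosomaxa/interviews | misc/self_dividing_number.py | get_dividers
-- ===== SOURCE A (Python) =====
-- def get_dividers(i):
--     number = i
--     dividers = []
--     while number > 0:
--         number, y = divmod(number, 10)
--         if y == 0:
--             return []
--
--         dividers.append(y)
--     return dividers
-- ===== SOURCE B (Python) =====
-- def get_dividers(i):
--     if i <= 0:
--         return []
--     s = str(i)
--     if '0' in s:
--         return []
--     return [ord(c) - 48 for c in reversed(s)]
-- ===== Notes on version B (the rewrite author's own statement) =====
-- stated objective: idiomatic
-- what changed: B replaces A's divmod accumulation loop with string conversion: it renders i with str, rejects when '0' occurs in the string, and otherwise maps the reversed characters to digit values via ord.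
import Mathlib
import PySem

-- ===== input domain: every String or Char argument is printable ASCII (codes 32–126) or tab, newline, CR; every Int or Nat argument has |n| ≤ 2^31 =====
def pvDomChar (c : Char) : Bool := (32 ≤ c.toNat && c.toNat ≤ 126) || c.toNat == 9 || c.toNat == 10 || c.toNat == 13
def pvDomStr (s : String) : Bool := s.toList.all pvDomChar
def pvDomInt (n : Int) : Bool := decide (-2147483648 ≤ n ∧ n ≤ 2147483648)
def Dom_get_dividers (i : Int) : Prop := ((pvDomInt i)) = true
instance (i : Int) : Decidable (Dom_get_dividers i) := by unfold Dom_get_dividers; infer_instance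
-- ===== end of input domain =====

-- B converts i to its decimal string instead of looping with divmod (objective: idiomatic).

-- ===== PORT A =====
-- A's while loop: number, y = divmod(number, 10); early return [] on a zero digit; append y.
def getDividersLoop (number : Int) (dividers : List Int) : List Int :=
  if _h : number > 0 then
    let q := PySem.Int.floordiv number 10
    let y := PySem.Int.mod number 10
    if y = 0 then []
    else getDividersLoop q (dividers ++ [y])
  else dividers
termination_by number.toNat
decreasing_by
  rw [PySem.Int.floordiv_eq_ediv_of_pos (by norm_num)]
  omega

def get_dividers (i : Int) : List Int := getDividersLoop i []

-- ===== PORT B =====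
def get_dividers_alt (i : Int) : List Int :=
  if i ≤ 0 then []
  else
    let s := PySem.Int.toStr i
    if '0' ∈ s.toList then []
    else s.toList.reverse.map (fun c => (c.toNat : Int) - 48)

-- ===== PRECONDITION & SPEC =====
def Spec_get_dividers (i : Int) (out : List Int) : Prop := out = get_dividers_alt i
instance (i : Int) (out : List Int) : Decidable (Spec_get_dividers i out) := by unfold Spec_get_dividers; infer_instance

-- ===== CLAIM (what is proved, stated in full; the proofs are below) =====
def Claim_equal_get_dividers : Prop := ∀ (i : Int), Dom_get_dividers i → Spec_get_dividers i (get_dividers i)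

-- ===== LEMMAS AND PROOFS =====

-- decimal digits of n, least significant first (proof-side reference)
def digitsLSF (n : Nat) : List Nat :=
  if h : n = 0 then [] else (n % 10) :: digitsLSF (n / 10)
termination_by n
decreasing_by exact Nat.div_lt_self (Nat.pos_of_ne_zero h) (by norm_num)

theorem digitsLSF_lt10 (n : Nat) : ∀ d ∈ digitsLSF n, d < 10 := by
  induction n using Nat.strong_induction_on with
  | _ n ih =>
    rw [digitsLSF]
    split
    · simp
    · rename_i h
      intro d hd
      rcases List.mem_cons.mp hd with h1 | h1
      · omega
      · exact ih (n / 10) (Nat.div_lt_self (Nat.pos_of_ne_zero h) (by norm_num)) d h1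

theorem loop_eq_digits (n : Nat) (acc : List Int) :
    getDividersLoop (n : Int) acc =
      if 0 ∈ digitsLSF n then [] else acc ++ (digitsLSF n).map (fun d : Nat => (d : Int)) := by
  induction n using Nat.strong_induction_on generalizing acc with
  | _ n ih =>
    rw [getDividersLoop, digitsLSF]
    by_cases h0 : n = 0
    · subst h0; simp
    · have hpos : (0 : Int) < (n : Int) := by exact_mod_cast Nat.pos_of_ne_zero h0
      rw [dif_pos hpos]
      simp only [dif_neg h0]
      have hfd : PySem.Int.floordiv (n : Int) 10 = ((n / 10 : Nat) : Int) := by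
        rw [PySem.Int.floordiv_eq_ediv_of_pos (by norm_num)]
        push_cast; ring
      have hmd : PySem.Int.mod (n : Int) 10 = ((n % 10 : Nat) : Int) := by
        rw [PySem.Int.mod_eq_emod_of_pos (by norm_num)]
        push_cast; ring
      rw [hfd, hmd]
      by_cases hy : n % 10 = 0
      · simp [hy]
      · have hy' : ((n % 10 : Nat) : Int) ≠ 0 := by exact_mod_cast hy
        rw [if_neg hy', ih (n / 10) (Nat.div_lt_self (Nat.pos_of_ne_zero h0) (by norm_num))]
        have hmem : (0 ∈ digitsLSF (n / 10)) = ((0 ∈ (n % 10 :: digitsLSF (n / 10) : List Nat))) := by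
          simp [List.mem_cons, Ne.symm hy]
        by_cases hz : 0 ∈ digitsLSF (n / 10)
        · simp [hz, List.mem_cons]
        · have : ¬ (0 ∈ (n % 10 :: digitsLSF (n / 10) : List Nat)) := by
            simp [List.mem_cons, Ne.symm hy, hz]
          rw [if_neg hz, if_neg this]
          simp [List.append_assoc]

theorem digitChar_toNat (d : Nat) (hd : d < 10) : (Nat.digitChar d).toNat = d + 48 := by
  interval_cases d <;> decide

theorem digitChar_eq_zero_iff (d : Nat) (hd : d < 10) : Nat.digitChar d = '0' ↔ d = 0 := by
  interval_cases d <;> decide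

theorem toDigitsCore_eq (n : Nat) (hn : 0 < n) :
    ∀ (fuel : Nat) (acc : List Char), n < fuel →
      Nat.toDigitsCore 10 fuel n acc = ((digitsLSF n).map Nat.digitChar).reverse ++ acc := by
  induction n using Nat.strong_induction_on with
  | _ n ih =>
    intro fuel acc hfuel
    match fuel with
    | 0 => omega
    | fuel + 1 =>
      rw [Nat.toDigitsCore]
      rw [digitsLSF, dif_neg (by omega : n ≠ 0)]
      by_cases hq : n / 10 = 0
      · rw [if_pos hq, hq]
        rw [digitsLSF]
        simp
      · rw [if_neg hq]
        have hlt : n / 10 < n := Nat.div_lt_self hn (by norm_num)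
        rw [ih (n / 10) hlt (Nat.pos_of_ne_zero hq) fuel
          (Nat.digitChar (n % 10) :: acc) (by omega)]
        simp [List.append_assoc]

theorem toChars_pos (n : Nat) (hn : 0 < n) :
    PySem.Int.toChars (n : Int) = ((digitsLSF n).map Nat.digitChar).reverse := by
  have : ¬ ((n : Int) < 0) := by omega
  rw [PySem.Int.toChars, if_neg this]
  have : ((n : Int)).toNat = n := Int.toNat_natCast n
  rw [this, Nat.toDigits, toDigitsCore_eq n hn (n + 1) [] (by omega)]
  simp

theorem map_digitChar_val (l : List Nat) (h : ∀ d ∈ l, d < 10) :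
    List.map ((fun c : Char => ((c.toNat : Int) - 48)) ∘ Nat.digitChar) l =
      List.map (fun d : Nat => (d : Int)) l := by
  apply List.map_congr_left
  intro d hd
  simp [Function.comp, digitChar_toNat d (h d hd)]

-- ===== VERDICT (by name: the statement is the Claim_ definition above) =====
theorem get_dividers_spec : Claim_equal_get_dividers := by
  intro i _hdom
  unfold Spec_get_dividers get_dividers get_dividers_alt
  by_cases hi : i ≤ 0
  · rw [getDividersLoop, dif_neg (by omega : ¬ i > 0), if_pos hi]
  · rw [if_neg hi]
    have hn : 0 < i.toNat := by omega
    have hcast : i = ((i.toNat : Nat) : Int) := by omega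
    rw [hcast, loop_eq_digits i.toNat []]
    simp only [PySem.Int.toList_toStr]
    rw [toChars_pos i.toNat hn]
    have hz : ('0' ∈ ((digitsLSF i.toNat).map Nat.digitChar).reverse) ↔ 0 ∈ digitsLSF i.toNat := by
      simp only [List.mem_reverse, List.mem_map]
      constructor
      · rintro ⟨d, hd, hdc⟩
        have := (digitChar_eq_zero_iff d (digitsLSF_lt10 _ d hd)).mp hdc
        rwa [this] at hd
      · intro h0
        exact ⟨0, h0, rfl⟩
    by_cases h0 : 0 ∈ digitsLSF i.toNat
    · rw [if_pos h0, if_pos (hz.mpr h0)]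
    · rw [if_neg h0, if_neg (fun h => h0 (hz.mp h))]
      rw [List.reverse_reverse, List.map_map, List.nil_append]
      rw [map_digitChar_val (digitsLSF i.toNat) (digitsLSF_lt10 i.toNat)]
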